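-- pv_equiv track=rewrite | github.com/harrisonlingren/randomPython | treeBottom/treeBottom.py | treeBottom
-- ===== SOURCE A (Python) =====
-- def treeBottom(tree):
--
--     def findTreeDepth(t):
--         currDepth = 0
--         maxDepth = 0
--         for symbol in t:
--             if symbol == '(':
--                 currDepth += 1
--             elif symbol == ')':
--                 currDepth -= 1
--
--             if currDepth > maxDepth:
--                 maxDepth = currDepth
--
--         return maxDepth - 1
--
--     def getBottomValues(t, d):
--         bottomVals = []
--         currDepth = 0
--         i = 0
--         while i < len(t)-1:
--             if t[i] == '(':
--                 currDepth += 1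
--             elif t[i] == ')':
--                 currDepth -= 1
--
--             if currDepth == d and t[i+1].isdigit():
--                 j = i
--                 nextNum = ''
--                 while t[j+1].isdigit():
--                     j += 1
--                     nextNum += t[j]
--                 i = j
--                 bottomVals.append(int(nextNum))
--
--             i += 1
--         return bottomVals
--
--     treeDepth = findTreeDepth(tree)
--     return getBottomValues(tree, treeDepth)
-- ===== SOURCE B (Python) =====
-- def treeBottom(tree):
--     # One pass: track depth and running max depth, bucket each integer by the
--     # depth at the character preceding it; finally return the bucket at maxDepth-1.
--     buckets = {}
--     currDepth = 0
--     maxDepth = 0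
--     n = len(tree)
--     i = 0
--     while i < n:
--         c = tree[i]
--         if c == '(':
--             currDepth += 1
--         elif c == ')':
--             currDepth -= 1
--         if currDepth > maxDepth:
--             maxDepth = currDepth
--         if i < n - 1 and tree[i + 1].isdigit():
--             j = i
--             num = ''
--             while j + 1 < n and tree[j + 1].isdigit():
--                 j += 1
--                 num += tree[j]
--             i = j
--             buckets.setdefault(currDepth, []).append(int(num))
--         i += 1
--     return buckets.get(maxDepth - 1, [])
-- ===== Notes on version B (the rewrite author's own statement) =====
-- stated objective: alternative
-- what changed: A scans the string twice (one pass to find the max depth, then a second filtered pass collecting only numbers at that depth); B makes a single pass that tracks depth and running max while bucketing every number under its depth in a dict, then returns the bucket at maxDepth-1.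
-- crash fix: On strings of length >= 2 ending in a digit that stands at depth maxDepth-1 (e.g. '()7'), A's inner while raises IndexError by reading past the end; B returns the bottom values including that final number ([7] for '()7'). — e.g. on treeBottom("()7"): A raises IndexError, B returns [7]
import Mathlib
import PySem

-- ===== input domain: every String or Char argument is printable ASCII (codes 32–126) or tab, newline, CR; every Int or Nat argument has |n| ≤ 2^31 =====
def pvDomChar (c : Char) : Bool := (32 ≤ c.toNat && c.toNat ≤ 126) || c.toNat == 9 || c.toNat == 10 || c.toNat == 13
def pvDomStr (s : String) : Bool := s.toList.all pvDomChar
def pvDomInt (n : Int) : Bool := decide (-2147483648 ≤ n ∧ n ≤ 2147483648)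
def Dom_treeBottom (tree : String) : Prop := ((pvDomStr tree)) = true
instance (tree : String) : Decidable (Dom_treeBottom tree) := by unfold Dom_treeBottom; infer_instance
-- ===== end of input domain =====

-- B replaces A's two filtered scans (find max depth, then re-scan for the numbers at
-- that depth) by ONE pass that buckets every number under its depth in a dict and
-- finally looks up bucket maxDepth-1 (objective: alternative decomposition, same cost).

-- ===== PORT A =====
-- inner `while t[j+1].isdigit(): j += 1; nextNum += t[j]` : none = IndexError (digit run reaches end of string)
def pvGrabA : List Char → Option (List Char × List Char)
  | [] => none
  | c :: rest =>
      if PySem.Chars.isdigit c then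
        match pvGrabA rest with
        | none => none
        | some (ds, r) => some (c :: ds, r)
      else some ([], c :: rest)

def pvFindTreeDepth (t : List Char) : Int :=
  (t.foldl (fun (st : Int × Int) symbol =>
      let curr := if symbol = '(' then st.1 + 1 else if symbol = ')' then st.1 - 1 else st.1
      (curr, if curr > st.2 then curr else st.2)) (0, 0)).2 - 1

-- the `while i < len(t)-1` loop of getBottomValues, one step per iteration;
-- fuel = number of remaining characters bounds the iteration count
def pvGoA (d : Int) : Nat → Int → List Char → List Int
  | 0, _, _ => []
  | _ + 1, _, [] => []
  | _ + 1, _, [_] => []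
  | fuel + 1, depth, c1 :: c2 :: rest =>
    let depth' := if c1 = '(' then depth + 1 else if c1 = ')' then depth - 1 else depth
    if depth' = d ∧ PySem.Chars.isdigit c2 then
      match pvGrabA (c2 :: rest) with
      | some (ds, r) => (PySem.Int.ofChars? ds).getD 0 :: pvGoA d fuel depth' r
      | none => []    -- Python raises IndexError here; excluded by Pre_treeBottom
    else pvGoA d fuel depth' (c2 :: rest)

def treeBottom (tree : String) : List Int :=
  pvGoA (pvFindTreeDepth tree.toList) tree.toList.length 0 tree.toList

-- ===== PORT B =====
-- inner `while j+1 < n and tree[j+1].isdigit()` : total (guarded), returns (digits, remainder)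
def pvGrabB : List Char → List Char × List Char
  | [] => ([], [])
  | c :: rest =>
      if PySem.Chars.isdigit c then
        let p := pvGrabB rest
        (c :: p.1, p.2)
      else ([], c :: rest)

-- B's single `while i < n` loop: state (currDepth, maxDepth, buckets)
def pvGoB : Nat → Int → Int → PySem.Dict Int (List Int) → List Char → Int × PySem.Dict Int (List Int)
  | 0, _, maxd, bk, _ => (maxd, bk)
  | _ + 1, _, maxd, bk, [] => (maxd, bk)
  | fuel + 1, depth, maxd, bk, c1 :: rest =>
    let depth' := if c1 = '(' then depth + 1 else if c1 = ')' then depth - 1 else depth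
    let maxd' := if depth' > maxd then depth' else maxd
    match rest with
    | [] => (maxd', bk)
    | c2 :: _ =>
      if PySem.Chars.isdigit c2 then
        let p := pvGrabB rest
        pvGoB fuel depth' maxd' (bk.insert depth' (bk.getD depth' [] ++ [(PySem.Int.ofChars? p.1).getD 0])) p.2
      else pvGoB fuel depth' maxd' bk rest

def treeBottom_alt (tree : String) : List Int :=
  let p := pvGoB tree.toList.length 0 0 PySem.Dict.empty tree.toList
  p.2.getD (p.1 - 1) []

-- ===== PRECONDITION & SPEC =====
-- input-shape helpers for Pre_ (paren-nesting delta / max depth of the string; last character)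
def pvDelta : List Char → Int
  | [] => 0
  | c :: r => (if c = '(' then 1 else if c = ')' then -1 else 0) + pvDelta r

def pvMaxAux : Int → Int → List Char → Int
  | _, m, [] => m
  | depth, m, c :: r =>
    let d := if c = '(' then depth + 1 else if c = ')' then depth - 1 else depth
    pvMaxAux d (if d > m then d else m) r

def pvMaxDepth (cs : List Char) : Int := pvMaxAux 0 0 cs

def pvLastDigit (cs : List Char) : Bool :=
  match cs.getLast? with
  | some c => PySem.Chars.isdigit c
  | none => false

-- A raises IndexError exactly on strings of length ≥ 2 that end in a digit standing at
-- depth maxDepth-1 (the inner while runs off the end there); Pre_ excludes exactly those.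
def pvRaisesB (cs : List Char) : Bool :=
  decide (2 ≤ cs.length) && pvLastDigit cs && decide (pvDelta cs = pvMaxDepth cs - 1)

def Pre_treeBottom (tree : String) : Prop := pvRaisesB tree.toList = false
instance (tree : String) : Decidable (Pre_treeBottom tree) := by unfold Pre_treeBottom; infer_instance

def pvWitness_treeBottom : String := "(2 (7) (3 (4)(5)) (1))"

-- On strings ending in a bottom-depth digit A raises IndexError; B returns the bottom
-- values including that final number.
def Raises_treeBottom (tree : String) : Prop := pvRaisesB tree.toList = true
instance (tree : String) : Decidable (Raises_treeBottom tree) := by unfold Raises_treeBottom; infer_instance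
def pvRaiseWitness_treeBottom : String := "()7"
def pvRaiseWitnessOut_treeBottom : List Int := [7]

def Spec_treeBottom (tree : String) (out : List Int) : Prop := out = treeBottom_alt tree
instance (tree : String) (out : List Int) : Decidable (Spec_treeBottom tree out) := by unfold Spec_treeBottom; infer_instance

-- ===== CLAIM (what is proved, stated in full; the proofs are below) =====
def Claim_equal_treeBottom : Prop := ∀ (tree : String), Dom_treeBottom tree → Pre_treeBottom tree → Spec_treeBottom tree (treeBottom tree)
def Claim_raises_treeBottom : Prop := (∀ (tree : String), Dom_treeBottom tree → Raises_treeBottom tree → ¬ Pre_treeBottom tree) ∧ (Dom_treeBottom (pvRaiseWitness_treeBottom) ∧ Raises_treeBottom (pvRaiseWitness_treeBottom) ∧ treeBottom_alt (pvRaiseWitness_treeBottom) = pvRaiseWitnessOut_treeBottom)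

-- ===== LEMMAS AND PROOFS =====

theorem pv_digit_ne {c : Char} (h : PySem.Chars.isdigit c = true) : c ≠ '(' ∧ c ≠ ')' := by
  constructor <;> rintro rfl <;> simp [PySem.Chars.isdigit] at h

theorem pv_upd_digit {c : Char} (h : PySem.Chars.isdigit c = true) (depth : Int) :
    (if c = '(' then depth + 1 else if c = ')' then depth - 1 else depth) = depth := by
  obtain ⟨h1, h2⟩ := pv_digit_ne h
  simp [h1, h2]

theorem pvGrabB_length (l : List Char) : (pvGrabB l).2.length ≤ l.length := by
  induction l with
  | nil => simp [pvGrabB]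
  | cons c rest ih =>
      simp only [pvGrabB]
      split
      · simpa using Nat.le_succ_of_le ih
      · simp

theorem pvGrabB_append (l : List Char) : (pvGrabB l).1 ++ (pvGrabB l).2 = l := by
  induction l with
  | nil => simp [pvGrabB]
  | cons c rest ih => simp only [pvGrabB]; split <;> simp [ih]

theorem pvGrabB_digits (l : List Char) : ∀ c ∈ (pvGrabB l).1, PySem.Chars.isdigit c = true := by
  induction l with
  | nil => simp [pvGrabB]
  | cons c rest ih =>
      simp only [pvGrabB]
      split
      · rename_i h; intro x hx; simp at hx
        rcases hx with rfl | hx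
        · exact h
        · exact ih x hx
      · simp

theorem pvGrabA_eq (l : List Char) :
    pvGrabA l = if (pvGrabB l).2.isEmpty then none else some (pvGrabB l) := by
  induction l with
  | nil => simp [pvGrabA, pvGrabB]
  | cons c rest ih =>
      simp only [pvGrabA, pvGrabB]
      split
      · rw [ih]
        by_cases he : (pvGrabB rest).2.isEmpty <;> simp [he]
      · simp

-- pvGoA does not depend on the fuel once it covers the list length
theorem pvGoA_fuel (d : Int) : ∀ (f1 : Nat) (cs : List Char) (f2 : Nat) (depth : Int),
    cs.length ≤ f1 → cs.length ≤ f2 → pvGoA d f1 depth cs = pvGoA d f2 depth cs := by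
  intro f1
  induction f1 with
  | zero =>
      intro cs f2 depth h1 _
      have : cs = [] := List.length_eq_zero_iff.mp (Nat.le_zero.mp h1)
      subst this
      cases f2 <;> simp [pvGoA]
  | succ f ih =>
      intro cs f2 depth h1 h2
      match cs, f2 with
      | [], f2 => cases f2 <;> simp [pvGoA]
      | [c], f2 =>
          simp at h2
          match f2 with
          | g + 1 => simp [pvGoA]
      | c1 :: c2 :: rest, f2 =>
          simp at h1 h2
          match f2 with
          | g + 1 =>
            simp only [pvGoA]
            by_cases hcond : ((if c1 = '(' then depth + 1 else if c1 = ')' then depth - 1 else depth) = d ∧ PySem.Chars.isdigit c2 = true)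
            · rw [if_pos hcond, if_pos hcond]
              cases hg : pvGrabA (c2 :: rest) with
              | none => rfl
              | some p =>
                  obtain ⟨ds, r⟩ := p
                  have hr : r.length ≤ rest.length + 1 := by
                    rw [pvGrabA_eq] at hg
                    split at hg
                    · cases hg
                    · have h2' : (pvGrabB (c2 :: rest)).2 = r := by
                        injection hg with hg'; rw [hg']
                      have := pvGrabB_length (c2 :: rest)
                      rw [h2'] at this; simpa using this
                  dsimp only
                  rw [ih r g _ (by omega) (by omega)]
            · rw [if_neg hcond, if_neg hcond]
              exact ih (c2 :: rest) g _ (by simp; omega) (by simp; omega)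

-- stepping A's loop through a digit run at a non-target depth captures nothing
theorem pvGoA_skip (d : Int) (ds : List Char) : ∀ (depth : Int) (r : List Char) (f g : Nat),
    (∀ c ∈ ds, PySem.Chars.isdigit c = true) → depth ≠ d →
    (ds ++ r).length ≤ f → r.length ≤ g →
    pvGoA d f depth (ds ++ r) = pvGoA d g depth r := by
  induction ds with
  | nil => intro depth r f g _ _ hf hg; simpa using pvGoA_fuel d f r g depth (by simpa using hf) hg
  | cons c ds' ih =>
      intro depth r f g hds hne hf hg
      have hc : PySem.Chars.isdigit c = true := hds c (by simp)
      have hds' : ∀ x ∈ ds', PySem.Chars.isdigit x = true := fun x hx => hds x (by simp [hx])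
      simp at hf
      match f with
      | f' + 1 =>
        cases hdr : ds' ++ r with
        | nil =>
            rcases List.append_eq_nil_iff.mp hdr with ⟨rfl, rfl⟩
            cases g <;> simp [pvGoA]
        | cons h t =>
            simp only [List.cons_append, hdr, pvGoA]
            rw [pv_upd_digit hc]
            rw [if_neg (by simp [hne])]
            rw [← hdr]
            exact ih depth r f' g hds' hne (by simp at hf ⊢; omega) hg

-- delta of a digit run is 0
theorem pvDelta_digits (ds : List Char) (r : List Char)
    (hds : ∀ c ∈ ds, PySem.Chars.isdigit c = true) : pvDelta (ds ++ r) = pvDelta r := by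
  induction ds with
  | nil => simp
  | cons c ds' ih =>
      have h12 := pv_digit_ne (hds c (by simp))
      simp only [List.cons_append, pvDelta, h12.1, h12.2, if_false]
      rw [ih (fun x hx => hds x (by simp [hx]))]
      simp

theorem pvLast_append (ds r : List Char) (hr : r ≠ []) : pvLastDigit (ds ++ r) = pvLastDigit r := by
  obtain ⟨c, hc⟩ := Option.isSome_iff_exists.mp (List.getLast?_isSome.mpr hr)
  simp [pvLastDigit, List.getLast?_append, hc]

theorem pvLast_digits (ds : List Char) (hne : ds ≠ [])
    (hds : ∀ c ∈ ds, PySem.Chars.isdigit c = true) : pvLastDigit ds = true := by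
  obtain ⟨c, hc⟩ := Option.isSome_iff_exists.mp (List.getLast?_isSome.mpr hne)
  unfold pvLastDigit
  rw [hc]
  exact hds c (List.mem_of_getLast? hc)

theorem pvMaxAux_cons (depth m : Int) (c : Char) (r : List Char) :
    pvMaxAux depth m (c :: r) =
      pvMaxAux (if c = '(' then depth + 1 else if c = ')' then depth - 1 else depth)
        (if (if c = '(' then depth + 1 else if c = ')' then depth - 1 else depth) > m
          then (if c = '(' then depth + 1 else if c = ')' then depth - 1 else depth) else m) r := rfl

-- a digit run never changes the running max once maxd ≥ depth
theorem pvMaxAux_skip (ds : List Char) (depth m : Int) (r : List Char)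
    (hds : ∀ c ∈ ds, PySem.Chars.isdigit c = true) (hm : depth ≤ m) :
    pvMaxAux depth m (ds ++ r) = pvMaxAux depth m r := by
  induction ds with
  | nil => simp
  | cons c ds' ih =>
      have hc := hds c (by simp)
      simp only [List.cons_append, pvMaxAux]
      rw [pv_upd_digit hc, if_neg (by omega)]
      exact ih (fun x hx => hds x (by simp [hx]))

-- B's first component is the running max-depth fold (skipping digit runs is harmless)
theorem pvGoB_fst : ∀ (fuel : Nat) (cs : List Char) (depth maxd : Int) (bk : PySem.Dict Int (List Int)),
    cs.length ≤ fuel → (pvGoB fuel depth maxd bk cs).1 = pvMaxAux depth maxd cs := by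
  intro fuel
  induction fuel with
  | zero =>
      intro cs depth maxd bk h
      have : cs = [] := List.length_eq_zero_iff.mp (Nat.le_zero.mp h)
      subst this; simp [pvGoB, pvMaxAux]
  | succ f ih =>
      intro cs depth maxd bk h
      match cs with
      | [] => simp [pvGoB, pvMaxAux]
      | [c1] => simp [pvGoB, pvMaxAux]
      | c1 :: c2 :: rest =>
          simp at h
          rw [pvMaxAux_cons]
          simp only [pvGoB]
          split
          · rename_i hdig
            have hlen := pvGrabB_length (c2 :: rest)
            rw [ih _ _ _ _ (by simp at hlen ⊢; omega)]
            conv_rhs => rw [← pvGrabB_append (c2 :: rest)]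
            rw [pvMaxAux_skip _ _ _ _ (pvGrabB_digits _) (by split <;> omega)]
          · rw [ih _ _ _ _ (by simp; omega)]

-- main invariant: B's bucket at key d accumulates exactly A's loop output
theorem pvB2A (d : Int) : ∀ (fuel : Nat) (cs : List Char), cs.length ≤ fuel →
    ∀ (g : Nat), cs.length ≤ g → ∀ (depth maxd : Int) (bk : PySem.Dict Int (List Int)),
    ¬(cs ≠ [] ∧ pvLastDigit cs = true ∧ depth + pvDelta cs = d) →
    (pvGoB fuel depth maxd bk cs).2.getD d [] = bk.getD d [] ++ pvGoA d g depth cs := by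
  intro fuel
  induction fuel with
  | zero =>
      intro cs h g hg depth maxd bk _
      have : cs = [] := List.length_eq_zero_iff.mp (Nat.le_zero.mp h)
      subst this
      cases g <;> simp [pvGoB, pvGoA]
  | succ f ih =>
      intro cs h g hg depth maxd bk hH
      match cs, g with
      | [], g => cases g <;> simp [pvGoB, pvGoA]
      | [c1], g =>
          simp at hg
          match g with
          | g' + 1 => simp [pvGoB, pvGoA]
      | c1 :: c2 :: rest, g =>
          simp at h hg
          match g with
          | g' + 1 =>
            set depth' := if c1 = '(' then depth + 1 else if c1 = ')' then depth - 1 else depth with hdepth'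
            have hdelta : depth + pvDelta (c1 :: c2 :: rest) = depth' + pvDelta (c2 :: rest) := by
              simp only [pvDelta, hdepth']
              split_ifs <;> ring
            by_cases hdig : PySem.Chars.isdigit c2 = true
            · -- digit run starting at c2
              set q := pvGrabB (c2 :: rest) with hq
              have happ : q.1 ++ q.2 = c2 :: rest := pvGrabB_append _
              have hdigs : ∀ c ∈ q.1, PySem.Chars.isdigit c = true := pvGrabB_digits _
              have hq1ne : q.1 ≠ [] := by
                rw [hq]; simp only [pvGrabB, hdig, if_true]; simp
              have hlen2 : q.2.length ≤ rest.length + 1 := by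
                have := pvGrabB_length (c2 :: rest); simpa using this
              have hdelta2 : pvDelta (c2 :: rest) = pvDelta q.2 := by
                rw [← happ]; exact pvDelta_digits _ _ hdigs
              have hH2 : ¬(q.2 ≠ [] ∧ pvLastDigit q.2 = true ∧ depth' + pvDelta q.2 = d) := by
                rintro ⟨hne2, hl2, hd2⟩
                apply hH
                refine ⟨by simp, ?_, by rw [hdelta, hdelta2]; exact hd2⟩
                have : c1 :: c2 :: rest = (c1 :: q.1) ++ q.2 := by simp [← happ]
                rw [this, pvLast_append _ _ hne2]
                exact hl2
              simp only [pvGoB, ← hdepth', ← hq, hdig, if_true]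
              by_cases hd : depth' = d
              · -- A captures too; the run cannot reach the end of the string (else A raises)
                have hq2ne : q.2 ≠ [] := by
                  intro hq2
                  apply hH
                  have hcs : c1 :: c2 :: rest = (c1 :: q.1) ++ q.2 := by simp [← happ]
                  refine ⟨by simp, ?_, ?_⟩
                  · rw [hcs, hq2, List.append_nil]
                    have : pvLastDigit (c1 :: q.1) = pvLastDigit q.1 := by
                      have : c1 :: q.1 = [c1] ++ q.1 := by simp
                      rw [this, pvLast_append _ _ hq1ne]
                    rw [this]
                    exact pvLast_digits _ hq1ne hdigs
                  · rw [hdelta, hdelta2, hq2]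
                    simpa [pvDelta] using hd
                have hA : pvGrabA (c2 :: rest) = some q := by
                  rw [pvGrabA_eq, ← hq, if_neg (by simpa [List.isEmpty_iff] using hq2ne)]
                simp only [pvGoA, ← hdepth', hd, hdig, and_self, if_true, hA]
                rw [hd] at hH2
                rw [ih _ (by omega) g' (by omega) _ _ _ hH2]
                rw [PySem.Dict.getD_insert_self]
                simp
              · -- A steps through the run without capture
                have hbk : (bk.insert depth' (bk.getD depth' [] ++ [(PySem.Int.ofChars? q.1).getD 0])).getD d []
                    = bk.getD d [] := by
                  rw [PySem.Dict.getD_insert]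
                  exact if_neg (fun hdd => hd hdd.symm)
                rw [ih _ (by omega) g' (by omega) _ _ _ hH2, hbk]
                simp only [pvGoA, ← hdepth']
                rw [if_neg (by simp [hd])]
                congr 1
                have : c2 :: rest = q.1 ++ q.2 := happ.symm
                rw [this]
                exact (pvGoA_skip d q.1 depth' q.2 g' g' hdigs hd (by rw [happ]; simp; omega) (by omega)).symm
            · -- no digit after c1: both sides take one plain step
              have hH2 : ¬(c2 :: rest ≠ [] ∧ pvLastDigit (c2 :: rest) = true ∧ depth' + pvDelta (c2 :: rest) = d) := by
                rintro ⟨_, hl2, hd2⟩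
                apply hH
                refine ⟨by simp, ?_, by rw [hdelta]; exact hd2⟩
                have : c1 :: c2 :: rest = [c1] ++ (c2 :: rest) := by simp
                rw [this, pvLast_append _ _ (by simp)]
                exact hl2
              have hdig' : PySem.Chars.isdigit c2 = false := by simpa using hdig
              simp only [pvGoB, ← hdepth', hdig', Bool.false_eq_true, if_false]
              rw [ih _ (by simp; omega) g' (by simp; omega) _ _ _ hH2]
              simp only [pvGoA, ← hdepth']
              rw [if_neg (by simp [hdig])]

theorem pvFindAux (cs : List Char) : ∀ (depth m : Int),
    (cs.foldl (fun (st : Int × Int) symbol =>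
      let curr := if symbol = '(' then st.1 + 1 else if symbol = ')' then st.1 - 1 else st.1
      (curr, if curr > st.2 then curr else st.2)) (depth, m)).2 = pvMaxAux depth m cs := by
  induction cs with
  | nil => intro depth m; simp [pvMaxAux]
  | cons c r ih => intro depth m; simp only [List.foldl_cons, pvMaxAux]; exact ih _ _

theorem pvFind_eq (cs : List Char) : pvFindTreeDepth cs = pvMaxDepth cs - 1 := by
  unfold pvFindTreeDepth pvMaxDepth
  rw [pvFindAux]

-- Pre_ implies the loop invariant's no-raise hypothesis
theorem pvPre_H (cs : List Char) (hpre : pvRaisesB cs = false) :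
    ¬(cs ≠ [] ∧ pvLastDigit cs = true ∧ (0 : Int) + pvDelta cs = pvMaxDepth cs - 1) := by
  rintro ⟨hne, hl, hd⟩
  simp only [pvRaisesB, Bool.and_eq_false_iff] at hpre
  rcases hpre with (h2 | hl') | hd'
  · -- length < 2: cs is a single digit char, whose delta is 0 and maxDepth is 0
    simp at h2
    match cs, hne with
    | [c], _ =>
        simp at h2
        have hc : PySem.Chars.isdigit c = true := by simpa [pvLastDigit] using hl
        have h12 := pv_digit_ne hc
        simp [pvDelta, pvMaxDepth, pvMaxAux, h12.1, h12.2] at hd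
    | c :: c' :: r, _ => simp at h2
  · rw [hl] at hl'; cases hl'
  · simp at hd'; rw [← hd] at hd'; simp at hd'

-- ===== VERDICT (by name: the statement is the Claim_ definition above) =====
theorem treeBottom_spec : Claim_equal_treeBottom := by
  intro tree _ hpre
  unfold Spec_treeBottom treeBottom treeBottom_alt
  dsimp only
  rw [pvFind_eq]
  have hfst : (pvGoB tree.toList.length 0 0 PySem.Dict.empty tree.toList).1 = pvMaxDepth tree.toList :=
    pvGoB_fst _ _ _ _ _ le_rfl
  rw [hfst]
  rw [pvB2A (pvMaxDepth tree.toList - 1) tree.toList.length tree.toList le_rfl tree.toList.length le_rfl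
      0 0 PySem.Dict.empty (pvPre_H tree.toList hpre)]
  simp

theorem treeBottom_raises : Claim_raises_treeBottom := by
  unfold Claim_raises_treeBottom
  refine ⟨?_, by decide, by decide, by decide⟩
  intro tree _ hr hp
  unfold Raises_treeBottom at hr
  unfold Pre_treeBottom at hp
  rw [hr] at hp
  cases hp

-- self-check that the stated raise witness really lies inside Raises_ (reads treeBottom_raises)
theorem pvRaiseWitness_ok : Raises_treeBottom (pvRaiseWitness_treeBottom) :=
  treeBottom_raises.2.2.1
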